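-- pv_equiv track=rewrite | github.com/ZiweiHu1206/python-projects | coins.py | coins_list
-- ===== SOURCE A (Python) =====
-- def coins_list(text):
--     """ (str) -> list
--     Returns a list containing all COMP202COIN in base 200 in text
--     >>> coins_list("BANKING TRANSACTIONS....PLANET ORION......FEBURARY /15,3019......
--     0cCCMMPP22........FEBRUARY 16, 3019..........0cOCOCOCOC......... /FEBRUARY17, 3019.
--     .........0C24242412")
--     ['0cCCMMPP22', '0cOCOCOCOC']
--     >>> coins_list("0C0C0C0C0C0CCCMMPP22")
--     ['0C0C0C0C0C', '0C0CCCMMPP']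
--     >>> coins_list('abcd1234')
--     []
--     """
--
--     #create an empty list, iterate through each 10-character in text to check
--     #if the 10-character is COMP202COIN, append to the list, skip to the next 10-character
--     coin_list = []
--     skip_characters = 0
--     for i in range(len(text)):
--         if i < skip_characters:
--             continue
--         if is_base202(text[i:i+10]):
--             coin_list.append(text[i:i+10])
--             skip_characters = i + 10
--
--     return coin_list
--
-- BASE202_CHARS = "0C2OMPIN"
--
-- def is_base202(text):
--     """ (str) -> bool
--     Returns True if text is a valid 10-character COMP202COIN, False otherwise.
--     >>> is_base_202('0cPN0I0PCI')
--     True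
--     >>> is_base_202('acPN0I0PCI')
--     False
--     >>> is_base_202('00000OC2')
--     False
--     >>> is_base_202('I like comp202')
--     False
--     """
--
--     #if text doesn't contain exactly 10 characters,or first 2 characters are not'0c',
--     #then return False
--     if len(text) != 10:
--         return False
--     elif text[0] != "0":
--         return False
--     elif text[1] not in "Cc":
--         return False
--
--     #iterate through each character to check membership of BASE202_CHARS
--     for i in range(2,10):
--         if text[i] not in BASE202_CHARS:
--             return False
--
--     return True
-- ===== SOURCE B (Python) =====
-- def coins_list(text):
--     # Two staged passes: first collect every (possibly overlapping) position
--     # where a valid coin starts, then greedily select non-overlapping ones.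
--     n = len(text)
--     starts = [i for i in range(n - 9)
--               if text[i] == '0' and text[i+1] in 'Cc'
--               and all(c in "0C2OMPIN" for c in text[i+2:i+10])]
--     coins = []
--     end = 0
--     for i in starts:
--         if end <= i:
--             coins.append(text[i:i+10])
--             end = i + 10
--     return coins
-- ===== Notes on version B (the rewrite author's own statement) =====
-- stated objective: alternative
-- what changed: Replaces A's single scan with a skip counter and a slice validator helper by two staged passes: a comprehension that first collects all (overlapping) valid coin start positions, then a greedy interval-selection fold over that list picking the leftmost non-overlapping starts.
import Mathlib
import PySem

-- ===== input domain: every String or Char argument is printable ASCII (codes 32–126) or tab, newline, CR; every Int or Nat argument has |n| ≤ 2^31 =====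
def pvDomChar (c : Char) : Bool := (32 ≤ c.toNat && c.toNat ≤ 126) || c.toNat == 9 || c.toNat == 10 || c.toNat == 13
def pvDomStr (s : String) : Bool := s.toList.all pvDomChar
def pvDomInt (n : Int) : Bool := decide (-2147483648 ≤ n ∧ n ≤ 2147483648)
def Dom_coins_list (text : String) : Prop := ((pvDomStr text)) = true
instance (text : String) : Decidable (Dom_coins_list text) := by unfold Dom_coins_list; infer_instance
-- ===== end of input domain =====

-- B replaces A's single skip-counter scan by two staged passes: collect all valid start
-- positions first, then greedily select non-overlapping ones (objective: alternative).

-- ===== PORT A =====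
def BASE202_CHARS : String := "0C2OMPIN"

-- `text[i] not in s` on a single char equals char membership in s's chars (exact);
-- after the length guard every index below is in range, so pyGetD's default is unreachable
def is_base202 (t : String) : Bool :=
  let cs := t.toList
  if cs.length ≠ 10 then false
  else if PySem.List.pyGetD cs 0 ' ' ≠ '0' then false
  else if !(("Cc".toList).contains (PySem.List.pyGetD cs 1 ' ')) then false
  else (PySem.List.pyRange 2 10 1).all
        (fun i => (BASE202_CHARS.toList).contains (PySem.List.pyGetD cs i ' '))

-- the body of A's for-loop (state: coin_list, skip_characters)
def coinsStep (cs : List Char) (st : List String × Int) (i : Int) : List String × Int :=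
  if i < st.2 then st
  else if is_base202 (String.ofList (PySem.List.slice cs (some i) (some (i + 10)))) then
    (st.1 ++ [String.ofList (PySem.List.slice cs (some i) (some (i + 10)))], i + 10)
  else st

def coins_list (text : String) : List String :=
  let cs := text.toList
  ((PySem.List.pyRange 0 (cs.length : Int) 1).foldl (coinsStep cs) ([], 0)).1

-- ===== PORT B =====
def base202Char (c : Char) : Bool := ("0C2OMPIN".toList).contains c

-- Source B's comprehension condition; every i in range(n-9) keeps all indices and the slice
-- in range, so pyGetD's default is unreachable
def coinStartI (cs : List Char) (i : Int) : Bool :=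
  (PySem.List.pyGetD cs i ' ' == '0')
    && (("Cc".toList).contains (PySem.List.pyGetD cs (i + 1) ' '))
    && (PySem.List.slice cs (some (i + 2)) (some (i + 10))).all base202Char

def coins_list_alt (text : String) : List String :=
  let cs := text.toList
  let starts := (PySem.List.pyRange 0 ((cs.length : Int) - 9) 1).filter (coinStartI cs)
  (starts.foldl (fun st i =>
      if st.2 ≤ i then
        (st.1 ++ [String.ofList (PySem.List.slice cs (some i) (some (i + 10)))], i + 10)
      else st) ([], (0 : Int))).1

-- ===== PRECONDITION & SPEC =====
def Spec_coins_list (text : String) (out : List String) : Prop := out = coins_list_alt text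
instance (text : String) (out : List String) : Decidable (Spec_coins_list text out) := by unfold Spec_coins_list; infer_instance

-- ===== CLAIM (what is proved, stated in full; the proofs are below) =====
def Claim_equal_coins_list : Prop := ∀ (text : String), Dom_coins_list text → Spec_coins_list text (coins_list text)

-- ===== LEMMAS AND PROOFS =====

-- proof-only: the valid-start test with Nat index and getD/drop/take
def coinAt (cs : List Char) (i : Nat) : Bool :=
  (cs.getD i ' ' == '0') && (("Cc".toList).contains (cs.getD (i + 1) ' '))
    && ((cs.drop (i + 2)).take 8).all base202Char

-- proof-only reference recursion: the greedy skip-10 scan both ports are reduced to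
def greedy (cs : List Char) (i : Nat) (acc : List String) : List String :=
  if i + 10 ≤ cs.length then
    if coinAt cs i then
      greedy cs (i + 10) (acc ++ [String.ofList ((cs.drop i).take 10)])
    else greedy cs (i + 1) acc
  else acc
termination_by cs.length - i

-- proof-only wrapper: A's loop body applied to a Nat index
def coinsStepN (cs : List Char) (st : List String × Int) (j : Nat) : List String × Int :=
  coinsStep cs st (j : Int)

-- proof-only: B's selection fold body applied to a Nat index, slice normalised
def selStep (cs : List Char) (st : List String × Int) (j : Nat) : List String × Int :=
  if st.2 ≤ (j : Int) then
    (st.1 ++ [String.ofList ((cs.drop j).take 10)], (j : Int) + 10)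
  else st

theorem slice_ten (cs : List Char) (i : Nat) :
    PySem.List.slice cs (some (i : Int)) (some ((i : Int) + 10)) = (cs.drop i).take 10 := by
  have h := PySem.List.slice_natCast_add cs i 10
  push_cast at h
  exact h

theorem is_base202_lit (c0 c1 c2 c3 c4 c5 c6 c7 c8 c9 : Char) :
    is_base202 (String.ofList [c0,c1,c2,c3,c4,c5,c6,c7,c8,c9]) =
      ((c0 == '0') && (("Cc".toList).contains c1)
        && ([c2,c3,c4,c5,c6,c7,c8,c9].all base202Char)) := by
  have hrange : PySem.List.pyRange 2 10 1 = [2,3,4,5,6,7,8,9] := by decide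
  have e0 : PySem.List.pyGetD [c0,c1,c2,c3,c4,c5,c6,c7,c8,c9] 0 ' ' = c0 := rfl
  have e1 : PySem.List.pyGetD [c0,c1,c2,c3,c4,c5,c6,c7,c8,c9] 1 ' ' = c1 := rfl
  simp only [is_base202, String.toList_ofList]
  split_ifs with g1 g2 g3
  · simp at g1
  · rw [e0] at g2
    simp [show (c0 == '0') = false from by simp [g2]]
  · rw [e1] at g3
    simp only [Bool.not_eq_eq_eq_not, Bool.not_true] at g3
    rw [g3]
    simp
  · rw [e0] at g2; rw [e1] at g3
    push Not at g2
    simp only [Bool.not_eq_eq_eq_not, Bool.not_true, Bool.not_eq_false] at g3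
    rw [hrange]
    simp only [List.all_cons, List.all_nil, Bool.and_true, base202Char,
      show (PySem.List.pyGetD [c0,c1,c2,c3,c4,c5,c6,c7,c8,c9] 2 ' ') = c2 from rfl,
      show (PySem.List.pyGetD [c0,c1,c2,c3,c4,c5,c6,c7,c8,c9] 3 ' ') = c3 from rfl,
      show (PySem.List.pyGetD [c0,c1,c2,c3,c4,c5,c6,c7,c8,c9] 4 ' ') = c4 from rfl,
      show (PySem.List.pyGetD [c0,c1,c2,c3,c4,c5,c6,c7,c8,c9] 5 ' ') = c5 from rfl,
      show (PySem.List.pyGetD [c0,c1,c2,c3,c4,c5,c6,c7,c8,c9] 6 ' ') = c6 from rfl,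
      show (PySem.List.pyGetD [c0,c1,c2,c3,c4,c5,c6,c7,c8,c9] 7 ' ') = c7 from rfl,
      show (PySem.List.pyGetD [c0,c1,c2,c3,c4,c5,c6,c7,c8,c9] 8 ' ') = c8 from rfl,
      show (PySem.List.pyGetD [c0,c1,c2,c3,c4,c5,c6,c7,c8,c9] 9 ' ') = c9 from rfl,
      show BASE202_CHARS.toList = "0C2OMPIN".toList from rfl,
      show (c0 == '0') = true from by simp [g2], g3]
    simp

theorem base_eq (cs : List Char) (i : Nat) (h : i + 10 ≤ cs.length) :
    is_base202 (String.ofList ((cs.drop i).take 10)) = coinAt cs i := by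
  have ht : 10 ≤ (cs.drop i).length := by simp; omega
  rcases hd : cs.drop i with _|⟨c0,_|⟨c1,_|⟨c2,_|⟨c3,_|⟨c4,_|⟨c5,_|⟨c6,_|⟨c7,_|⟨c8,_|⟨c9,rest⟩⟩⟩⟩⟩⟩⟩⟩⟩⟩ <;>
    rw [hd] at ht <;> simp at ht
  have h0 : cs.getD i ' ' = c0 := by
    have h' : (cs.drop i)[0]? = cs[i+0]? := List.getElem?_drop
    rw [hd] at h'; simp at h'
    simp [List.getD_eq_getElem?_getD, ← h']
  have h1 : cs.getD (i+1) ' ' = c1 := by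
    have h' : (cs.drop i)[1]? = cs[i+1]? := List.getElem?_drop
    rw [hd] at h'; simp at h'
    simp [List.getD_eq_getElem?_getD, ← h']
  have h2 : cs.drop (i+2) = c2::c3::c4::c5::c6::c7::c8::c9::rest := by
    have hdd : cs.drop (i+2) = (cs.drop i).drop 2 := by rw [List.drop_drop]
    rw [hdd, hd]; rfl
  rw [coinAt, h0, h1, h2,
      show (c0::c1::c2::c3::c4::c5::c6::c7::c8::c9::rest).take 10
            = [c0,c1,c2,c3,c4,c5,c6,c7,c8,c9] from by simp,
      show ((c2::c3::c4::c5::c6::c7::c8::c9::rest).take 8)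
            = [c2,c3,c4,c5,c6,c7,c8,c9] from by simp]
  exact is_base202_lit c0 c1 c2 c3 c4 c5 c6 c7 c8 c9

theorem base_short (cs : List Char) (i : Nat) (h : ¬ i + 10 ≤ cs.length) :
    is_base202 (String.ofList ((cs.drop i).take 10)) = false := by
  simp [is_base202]
  omega

theorem skip_run (cs : List Char) (j : Nat) : ∀ (i : Nat) (acc : List String) (s : Int),
    ((i : Int) + (j : Int)) ≤ s →
    (List.range' i j).foldl (coinsStepN cs) (acc, s) = (acc, s) := by
  induction j with
  | zero => intro i acc s _; rfl
  | succ m IH =>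
    intro i acc s hs
    rw [List.range'_succ, List.foldl_cons]
    have hi : (i : Int) < s := by push_cast at hs ⊢; omega
    rw [show coinsStepN cs (acc, s) i = (acc, s) from by simp [coinsStepN, coinsStep, hi]]
    exact IH (i + 1) acc s (by push_cast at hs ⊢; omega)

theorem main_loop (cs : List Char) (k : Nat) : ∀ (i : Nat) (acc : List String) (s : Int),
    i + k = cs.length → s ≤ (i : Int) →
    ((List.range' i k).foldl (coinsStepN cs) (acc, s)).1
      = greedy cs i acc := by
  induction k using Nat.strong_induction_on with
  | _ k IH =>
    intro i acc s hk hs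
    match k with
    | 0 =>
      rw [greedy]
      simp only [List.range'_zero, List.foldl_nil]
      rw [if_neg (by omega)]
    | Nat.succ m =>
      rw [List.range'_succ, List.foldl_cons]
      have hi : ¬ ((i : Int) < s) := by omega
      by_cases h10 : i + 10 ≤ cs.length
      · rw [show coinsStepN cs (acc, s) i
              = (if coinAt cs i then (acc ++ [String.ofList ((cs.drop i).take 10)], (i : Int) + 10) else (acc, s)) from by
            rw [coinsStepN, coinsStep, if_neg hi, slice_ten, base_eq cs i h10]]
        cases hc : coinAt cs i with
        | false =>
          rw [if_neg (by simp)]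
          rw [greedy, if_pos h10, if_neg (by simp [hc])]
          exact IH m (by omega) (i + 1) acc s (by omega) (by push_cast; omega)
        | true =>
          rw [if_pos rfl]
          have hm : 9 ≤ m := by omega
          have hsplit : List.range' (i+1) m = List.range' (i+1) 9 ++ List.range' (i+1+9) (m-9) := by
            rw [List.range'_append]; congr 1; omega
          rw [hsplit, List.foldl_append]
          rw [skip_run cs 9 (i+1) _ ((i : Int) + 10) (by push_cast; omega)]
          rw [greedy, if_pos h10, if_pos hc]
          have := IH (m - 9) (by omega) (i + 10) (acc ++ [String.ofList ((cs.drop i).take 10)])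
            ((i : Int) + 10) (by omega) (by push_cast; omega)
          rw [show i + 1 + 9 = i + 10 from by omega]
          exact this
      · rw [show coinsStepN cs (acc, s) i = (acc, s) from by
            rw [coinsStepN, coinsStep, if_neg hi, slice_ten, base_short cs i h10]; rfl]
        rw [greedy, if_neg h10]
        have h2 : greedy cs (i + 1) acc = acc := by rw [greedy, if_neg (by omega)]
        rw [IH m (by omega) (i + 1) acc s (by omega) (by push_cast; omega)]
        exact h2

-- ===== B-side lemmas =====

theorem coinStart_cast (cs : List Char) (j : Nat) :
    coinStartI cs (j : Int) = coinAt cs j := by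
  have h1 : PySem.List.pyGetD cs (j : Int) ' ' = cs.getD j ' ' :=
    PySem.List.pyGetD_natCast cs j ' '
  have h2 : PySem.List.pyGetD cs ((j : Int) + 1) ' ' = cs.getD (j + 1) ' ' := by
    rw [show (j : Int) + 1 = ((j + 1 : Nat) : Int) from by push_cast; ring]
    exact PySem.List.pyGetD_natCast cs (j+1) ' '
  have h3 : PySem.List.slice cs (some ((j : Int) + 2)) (some ((j : Int) + 10))
      = (cs.drop (j + 2)).take 8 := by
    have h := PySem.List.slice_natCast_add cs (j + 2) 8
    push_cast at h
    rw [show (j : Int) + 10 = (j : Int) + 2 + 8 from by ring]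
    exact h
  rw [coinStartI, coinAt, h1, h2, h3]

-- greedy walks unchanged past a run of non-starts (or past the end)
theorem greedy_skip (cs : List Char) (d : Nat) : ∀ (e : Nat) (acc : List String),
    e + d ≤ cs.length - 9 →
    (∀ p, e ≤ p → p < e + d → coinAt cs p = false) →
    greedy cs e acc = greedy cs (e + d) acc := by
  induction d with
  | zero => intro e acc _ _; rfl
  | succ m IH =>
    intro e acc hb hF
    have h10 : e + 10 ≤ cs.length := by omega
    rw [greedy, if_pos h10, if_neg (by simp [hF e le_rfl (by omega)])]
    rw [show e + (m + 1) = (e + 1) + m from by omega]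
    exact IH (e + 1) acc (by omega) (fun p hp1 hp2 => hF p (by omega) (by omega))

-- greedy at or past the last candidate returns the accumulator
theorem greedy_done (cs : List Char) (e : Nat) (acc : List String)
    (h : cs.length - 9 ≤ e) : greedy cs e acc = acc := by
  rw [greedy, if_neg (by omega)]

theorem sel_loop (cs : List Char) (k : Nat) : ∀ (j en : Nat) (acc : List String),
    j + k = cs.length - 9 →
    (∀ p, en ≤ p → p < j → coinAt cs p = false) →
    (((List.range' j k).filter (coinAt cs)).foldl (selStep cs) (acc, (en : Int))).1
      = greedy cs en acc := by
  induction k with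
  | zero =>
    intro j en acc hk hF
    simp only [List.range'_zero, List.filter_nil, List.foldl_nil]
    by_cases he : en < j
    · rw [greedy_skip cs (j - en) en acc (by omega)
          (fun p hp1 hp2 => hF p hp1 (by omega))]
      exact (greedy_done cs (en + (j - en)) acc (by omega)).symm
    · exact (greedy_done cs en acc (by omega)).symm
  | succ m IH =>
    intro j en acc hk hF
    have h10 : j + 10 ≤ cs.length := by omega
    rw [List.range'_succ]
    cases hc : coinAt cs j with
    | false =>
      rw [List.filter_cons_of_neg (by simp [hc])]
      exact IH (j + 1) en acc (by omega)
        (fun p hp1 hp2 => by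
          by_cases hpj : p < j
          · exact hF p hp1 hpj
          · have : p = j := by omega
            rw [this]; exact hc)
    | true =>
      rw [List.filter_cons_of_pos (by simp [hc]), List.foldl_cons]
      by_cases he : en ≤ j
      · rw [show selStep cs (acc, (en : Int)) j
            = (acc ++ [String.ofList ((cs.drop j).take 10)], ((j + 10 : Nat) : Int)) from by
              rw [selStep, if_pos (by push_cast; omega)]; push_cast; ring_nf]
        rw [greedy_skip cs (j - en) en acc (by omega)
            (fun p hp1 hp2 => hF p hp1 (by omega)),
          show en + (j - en) = j from by omega,
          greedy, if_pos h10, if_pos hc]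
        exact IH (j + 1) (j + 10) (acc ++ [String.ofList ((cs.drop j).take 10)])
          (by omega) (fun p hp1 hp2 => by omega)
      · rw [show selStep cs (acc, (en : Int)) j = (acc, (en : Int)) from by
            rw [selStep, if_neg (by push_cast; omega)]]
        exact IH (j + 1) en acc (by omega)
          (fun p hp1 hp2 => hF p hp1 (by omega))

theorem alt_eq_greedy (text : String) :
    coins_list_alt text = greedy text.toList 0 [] := by
  have hR : ∀ (cs : List Char), PySem.List.pyRange 0 ((cs.length : Int) - 9) 1
      = (List.range (cs.length - 9)).map (fun (k : Nat) => (k : Int)) := by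
    intro cs
    by_cases h9 : 9 ≤ cs.length
    · rw [show (cs.length : Int) - 9 = ((cs.length - 9 : Nat) : Int) from by push_cast [h9]; ring]
      exact PySem.List.pyRange_zero_natCast (cs.length - 9)
    · rw [PySem.List.pyRange_one_eq_nil (by omega),
        show cs.length - 9 = 0 from by omega]
      rfl
  simp only [coins_list_alt, hR, List.filter_map, List.foldl_map, Function.comp_def,
    coinStart_cast, slice_ten]
  rw [List.range_eq_range']
  exact sel_loop text.toList (text.toList.length - 9) 0 0 [] (by omega) (fun p hp1 hp2 => by omega)

-- ===== VERDICT (by name: the statement is the Claim_ definition above) =====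
theorem coins_list_spec : Claim_equal_coins_list := by
  intro text _
  unfold Spec_coins_list
  rw [alt_eq_greedy]
  simp only [coins_list]
  rw [PySem.List.pyRange_zero_natCast, List.foldl_map, List.range_eq_range']
  exact main_loop text.toList text.toList.length 0 [] 0 (by omega) le_rfl
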